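-- pv_equiv track=rewrite | github.com/sonder314/sirius | data_structures/task_4.py | f
-- ===== SOURCE A (Python) =====
-- def download(stack, array, now):
--     for i in range(len(array)):
--         if array[i] == now:
--             stack.append(array[i])
--             return stack, array[i + 1::]
--         else:
--             stack.append(array[i])
--     return stack, array[i + 1::]
--
-- def top(stack):
--     if stack:
--         return stack[-1]
--     return 0
--
-- def delete(stack, array, now):
--     while top(stack) == now:
--         stack.pop()
--         now += 1
--     return stack, array, now
--
-- def f(array):
--     stack = []
--     now = 1
--     while array:
--         stack, array = download(stack, array, now)
--         stack, array, now = delete(stack, array, now)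
--     if stack[::-1] == sorted(stack):
--         return 'YES'
--     return 'NO'
-- ===== SOURCE B (Python) =====
-- def f(array):
--     stack = []
--     now = 1
--     for x in array:
--         stack.append(x)
--         while stack and stack[-1] == now:
--             stack.pop()
--             now += 1
--     return 'YES' if all(a >= b for a, b in zip(stack, stack[1:])) else 'NO'
-- ===== Notes on version B (the rewrite author's own statement) =====
-- stated objective: simpler
-- what changed: Replaces A's repeated download/delete passes with array slicing plus a final sort-and-compare by a single left-to-right pass (push each element, pop while the top equals the expected counter) and an adjacent-pair descending check of the leftover stack.
import Mathlib
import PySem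

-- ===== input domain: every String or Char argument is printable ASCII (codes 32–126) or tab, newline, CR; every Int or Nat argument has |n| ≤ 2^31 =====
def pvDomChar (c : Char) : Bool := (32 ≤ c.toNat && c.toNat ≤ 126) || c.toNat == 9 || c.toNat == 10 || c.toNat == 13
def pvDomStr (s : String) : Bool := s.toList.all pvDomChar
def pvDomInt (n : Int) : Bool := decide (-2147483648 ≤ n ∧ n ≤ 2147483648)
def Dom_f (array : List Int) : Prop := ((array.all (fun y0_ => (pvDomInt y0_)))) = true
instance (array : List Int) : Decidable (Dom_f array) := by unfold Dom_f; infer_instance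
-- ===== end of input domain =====

-- B replaces A's repeated download/delete passes with slicing plus a final sort-and-compare
-- by a single left-to-right push/pop pass with an adjacent-pair check of the leftover stack.

-- ===== PORT A =====
-- `download`: the for-loop over indices, ported as the obvious recursion over the array
-- (each step is one iteration: compare array[i] to now, append, maybe return with the slice
-- array[i+1::], which for x :: rest is rest; after a full loop array[i+1::] is []).
-- On an empty array Python's `i` is unbound (NameError); f's `while array` guard makes that
-- call unreachable, the [] case here is never hit from f.
def downloadA : List Int → List Int → Int → List Int × List Int
  | stack, [], _ => (stack, [])
  | stack, x :: rest, now =>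
    if x = now then (stack ++ [x], rest)
    else downloadA (stack ++ [x]) rest now

-- `top`
def topA (stack : List Int) : Int :=
  match stack.getLast? with
  | some t => t
  | none => 0

-- lemma needed for deleteA's termination
theorem dropLast_lt (s : List Int) (h : s ≠ []) : s.dropLast.length < s.length := by
  cases s with
  | nil => exact absurd rfl h
  | cons a t => simp [List.length_dropLast]

-- `delete`: the while-loop as recursion.  Python pops stack[-1] (the last element), i.e.
-- dropLast.  The extra `stack ≠ []` conjunct only makes the function total where Python
-- would raise IndexError popping an empty stack (reachable only with now ≤ 0, never from f,
-- whose `now` starts at 1 and only grows).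
def deleteA (stack : List Int) (array : List Int) (now : Int) :
    List Int × List Int × Int :=
  if h : topA stack = now ∧ stack ≠ [] then
    deleteA stack.dropLast array (now + 1)
  else (stack, array, now)
termination_by stack.length
decreasing_by exact dropLast_lt stack h.2

-- lemmas needed for fLoop's termination
theorem deleteA_array (stack array : List Int) (now : Int) :
    (deleteA stack array now).2.1 = array := by
  induction stack, now using deleteA.induct with
  | case1 stack now h ih => rw [deleteA, dif_pos h]; exact ih
  | case2 stack now h => rw [deleteA, dif_neg h]

theorem downloadA_len (stack : List Int) (x : Int) (rest : List Int) (now : Int) :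
    (downloadA stack (x :: rest) now).2.length ≤ rest.length := by
  induction rest generalizing stack x with
  | nil => by_cases h : x = now <;> simp [downloadA, h]
  | cons y r ih =>
    by_cases h : x = now
    · simp [downloadA, h]
    · simpa [downloadA, h] using Nat.le_succ_of_le (ih (stack ++ [x]) y)

-- the `while array:` loop of f (final value of `now` is unused by f)
def fLoop (stack : List Int) (array : List Int) (now : Int) : List Int :=
  match array with
  | [] => stack
  | x :: rest =>
    let d := downloadA stack (x :: rest) now
    let e := deleteA d.1 d.2 now
    fLoop e.1 e.2.1 e.2.2
termination_by array.length
decreasing_by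
  simp only [deleteA_array]
  exact Nat.lt_succ_of_le (downloadA_len stack x rest now)

-- stack[::-1] is List.reverse (PySem.List.slice?_none_none_neg_one); sorted(stack) is
-- PySem.List.sorted with the identity key.
def f (array : List Int) : String :=
  let stack := fLoop [] array 1
  if stack.reverse = PySem.List.sorted stack (fun x => x) then "YES" else "NO"

-- ===== PORT B =====
-- the inner `while stack and stack[-1] == now` loop of B
def popAlt (stack : List Int) (now : Int) : List Int × Int :=
  if h : stack.getLast? = some now then popAlt stack.dropLast (now + 1)
  else (stack, now)
termination_by stack.length
decreasing_by exact dropLast_lt stack (by rintro rfl; simp at h)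

-- one iteration of B's for-loop: push x, then pop while the top equals now
def stepB (st : List Int × Int) (x : Int) : List Int × Int :=
  popAlt (st.1 ++ [x]) st.2

-- all(a >= b for a, b in zip(stack, stack[1:])) — stack[1:] is drop 1
def f_alt (array : List Int) : String :=
  let st := array.foldl stepB ([], 1)
  if (st.1.zip (st.1.drop 1)).all (fun p => decide (p.2 ≤ p.1)) then "YES" else "NO"

-- ===== PRECONDITION & SPEC =====
def Spec_f (array : List Int) (out : String) : Prop := out = f_alt array
instance (array : List Int) (out : String) : Decidable (Spec_f array out) := by unfold Spec_f; infer_instance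

-- ===== CLAIM (what is proved, stated in full; the proofs are below) =====
def Claim_equal_f : Prop := ∀ (array : List Int), Dom_f array → Spec_f array (f array)

-- ===== LEMMAS AND PROOFS =====

-- A's delete loop and B's pop loop are the same iteration
theorem deleteA_eq_popAlt (stack array : List Int) (now : Int) :
    deleteA stack array now = ((popAlt stack now).1, array, (popAlt stack now).2) := by
  induction stack, now using popAlt.induct with
  | case1 stack now h ih =>
    have hne : stack ≠ [] := by rintro rfl; simp at h
    have htop : topA stack = now := by simp [topA, h]
    rw [deleteA, dif_pos ⟨htop, hne⟩, popAlt, dif_pos h]; exact ih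
  | case2 stack now h =>
    have : ¬ (topA stack = now ∧ stack ≠ []) := by
      rintro ⟨htop, hne⟩
      have ht := List.getLast?_eq_getLast_of_ne_nil hne
      apply h; rw [ht]; simpa [topA, ht] using htop
    rw [deleteA, dif_neg this, popAlt, dif_neg h]

theorem popAlt_of_ne (stack : List Int) (x now : Int) (h : x ≠ now) :
    popAlt (stack ++ [x]) now = (stack ++ [x], now) := by
  rw [popAlt, dif_neg]; simp [h]

-- skipping a non-matching element: one download step folds into the stack
theorem fLoop_cons_ne (stack : List Int) (x : Int) (rest : List Int) (now : Int)
    (h : x ≠ now) : fLoop stack (x :: rest) now = fLoop (stack ++ [x]) rest now := by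
  cases rest with
  | nil =>
    have hd : downloadA stack [x] now = (stack ++ [x], []) := by simp [downloadA, h]
    have he : deleteA (stack ++ [x]) [] now = (stack ++ [x], [], now) := by
      rw [deleteA, dif_neg]
      rintro ⟨htop, -⟩
      exact h (by simpa [topA] using htop)
    conv_lhs => rw [fLoop]
    simp only [hd, he, fLoop]
  | cons y r =>
    have hd : downloadA stack (x :: y :: r) now = downloadA (stack ++ [x]) (y :: r) now := by
      simp [downloadA, h]
    conv_lhs => rw [fLoop]
    conv_rhs => rw [fLoop]
    simp only [hd]

-- the main loop invariant: A's while-loop equals B's single foldl pass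
theorem fLoop_eq_foldl (array : List Int) :
    ∀ stack now, fLoop stack array now = (array.foldl stepB (stack, now)).1 := by
  induction array with
  | nil => intro stack now; rw [fLoop]; rfl
  | cons x rest ih =>
    intro stack now
    by_cases h : x = now
    · subst h
      have hd : downloadA stack (x :: rest) x = (stack ++ [x], rest) := by
        simp [downloadA]
      conv_lhs => rw [fLoop]
      simp only [hd, deleteA_eq_popAlt, List.foldl_cons]
      exact ih _ _
    · rw [fLoop_cons_ne stack x rest now h, List.foldl_cons]
      have : stepB (stack, now) x = (stack ++ [x], now) := popAlt_of_ne stack x now h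
      rw [this]
      exact ih _ _

-- adjacent-pair check ⇔ Pairwise (descending), cons form
theorem zip_all_pairwise (x : Int) (xs : List Int) :
    (((x :: xs).zip xs).all (fun p => decide (p.2 ≤ p.1)) = true) ↔
      (x :: xs).Pairwise (fun a b => b ≤ a) := by
  induction xs generalizing x with
  | nil => simp
  | cons y r ih =>
    simp only [List.zip_cons_cons, List.all_cons, Bool.and_eq_true, decide_eq_true_eq,
      List.pairwise_cons]
    rw [ih y]
    simp only [List.pairwise_cons]
    constructor
    · rintro ⟨hyx, hy, hr⟩
      refine ⟨?_, hy, hr⟩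
      intro z hz
      rcases List.mem_cons.1 hz with rfl | hz
      · exact hyx
      · exact le_trans (hy z hz) hyx
    · rintro ⟨hx, hy, hr⟩
      exact ⟨hx y (List.mem_cons_self), hy, hr⟩

-- A's final test ⇔ B's final test, for any stack
theorem final_test_iff (st : List Int) :
    (st.reverse = PySem.List.sorted st (fun x => x)) ↔
      ((st.zip (st.drop 1)).all (fun p => decide (p.2 ≤ p.1)) = true) := by
  have hpw : ((st.zip (st.drop 1)).all (fun p => decide (p.2 ≤ p.1)) = true) ↔
      st.Pairwise (fun a b => b ≤ a) := by
    cases st with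
    | nil => simp
    | cons x xs => simpa using zip_all_pairwise x xs
  rw [hpw]
  constructor
  · intro h
    have := PySem.List.sorted_pairwise st (fun x => x)
    rw [← h, List.pairwise_reverse] at this
    exact this
  · intro h
    exact (PySem.List.sorted_id_eq_of_perm_of_pairwise st st.reverse
      (List.reverse_perm st) (List.pairwise_reverse.2 h)).symm

-- ===== VERDICT (by name: the statement is the Claim_ definition above) =====
theorem f_spec : Claim_equal_f := by
  intro array _
  unfold Spec_f f f_alt
  rw [fLoop_eq_foldl array [] 1]
  by_cases h : ((array.foldl stepB ([], 1)).1.zip ((array.foldl stepB ([], 1)).1.drop 1)).all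
      (fun p => decide (p.2 ≤ p.1)) = true
  · rw [if_pos ((final_test_iff _).2 h), if_pos h]
  · rw [if_neg (fun hc => h ((final_test_iff _).1 hc)), if_neg h]
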